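-- pv_equiv track=rewrite | github.com/pc5401/my_BOJ | 백준/Silver/2822. 점수 계산/점수 계산.py | solve
-- ===== SOURCE A (Python) =====
-- def solve(scores: list[int]) -> tuple[int, list[int]]:
--     ranks = [(s, i) for i, s in enumerate(scores, start=1)]
--     ranks.sort(key=lambda x: -x[0])
--
--     total_score = 0
--     numbers = []
--     for i in range(5):
--         score, num = ranks[i]
--         total_score += score
--         numbers.append(num)
--
--     numbers.sort()
--
--     return total_score, numbers
-- ===== SOURCE B (Python) =====
-- def solve(scores: list[int]) -> tuple[int, list[int]]:
--     # five selection passes instead of a full sort; ties go to the earliest index,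
--     # matching the stable sort's order
--     remaining = [(s, i) for i, s in enumerate(scores, start=1)]
--     total_score = 0
--     numbers = []
--     for _ in range(5):
--         best = remaining[0]
--         for cand in remaining[1:]:
--             if cand[0] > best[0]:
--                 best = cand
--         total_score += best[0]
--         numbers.append(best[1])
--         remaining.remove(best)
--     numbers.sort()
--     return total_score, numbers
-- ===== Notes on version B (the rewrite author's own statement) =====
-- stated objective: alternative
-- what changed: Replaces the full stable sort of all indexed scores by five linear selection passes that each pick the highest remaining score (ties to the earliest index) and remove it; no list is ever fully sorted by score.
import Mathlib
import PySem

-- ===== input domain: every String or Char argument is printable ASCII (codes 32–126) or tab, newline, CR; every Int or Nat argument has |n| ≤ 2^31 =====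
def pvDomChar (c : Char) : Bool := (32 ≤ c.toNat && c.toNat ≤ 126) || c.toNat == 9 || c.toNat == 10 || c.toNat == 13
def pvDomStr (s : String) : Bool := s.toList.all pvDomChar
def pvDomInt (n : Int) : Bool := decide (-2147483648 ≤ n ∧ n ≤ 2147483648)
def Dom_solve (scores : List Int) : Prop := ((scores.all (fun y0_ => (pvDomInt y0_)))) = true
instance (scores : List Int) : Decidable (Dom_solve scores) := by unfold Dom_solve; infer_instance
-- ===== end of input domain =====

-- B replaces A's full stable sort by five linear selection passes (ties to the earliest index); same results, similar cost.


-- ===== PORT A =====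
def solve (scores : List Int) : Int × List Int :=
  -- ranks = [(s, i) for i, s in enumerate(scores, start=1)]
  let ranks := (PySem.List.enumerate scores 1).map (fun p => (p.2, p.1))
  -- ranks.sort(key=lambda x: -x[0])  (stable)
  let ranks := PySem.List.sorted ranks (fun x => -x.1) false
  -- for i in range(5): score, num = ranks[i]; total += score; numbers.append(num)
  -- ranks[i] raises IndexError when len < 5: Pre_solve excludes that; default never used under Pre_
  let st := (PySem.List.pyRange 0 5 1).foldl
    (fun (st : Int × List Int) i =>
      let p := PySem.List.pyGetD ranks i (0, 0)
      (st.1 + p.1, st.2 ++ [p.2])) (0, [])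
  (st.1, PySem.List.sorted st.2 (fun x => x) false)

-- ===== PORT B =====
-- inner pass: for cand in remaining[1:]: if cand[0] > best[0]: best = cand
def pvSelBest (b : Int × Int) (cs : List (Int × Int)) : Int × Int :=
  cs.foldl (fun b c => if b.1 < c.1 then c else b) b

-- the five passes: best = remaining[0]; scan; total += best[0]; numbers.append(best[1]); remaining.remove(best)
-- remaining[0] raises IndexError when remaining is empty: Pre_solve excludes that; defaults never used under Pre_
def pvPick : Nat → List (Int × Int) → Int → List Int → Int × List Int
  | 0, _, tot, nums => (tot, nums)
  | k + 1, rem, tot, nums =>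
    let best := pvSelBest (PySem.List.pyGetD rem 0 (0, 0)) (PySem.List.slice rem (some 1) none)
    pvPick k ((PySem.List.remove? rem best).getD rem) (tot + best.1) (nums ++ [best.2])

def solve_alt (scores : List Int) : Int × List Int :=
  let remaining := (PySem.List.enumerate scores 1).map (fun p => (p.2, p.1))
  let st := pvPick 5 remaining 0 []
  (st.1, PySem.List.sorted st.2 (fun x => x) false)

-- ===== PRECONDITION & SPEC =====
-- A indexes ranks[0..4]: it raises IndexError on fewer than five scores (B's remaining[0] too)
def Pre_solve (scores : List Int) : Prop := 5 ≤ scores.length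
instance (scores : List Int) : Decidable (Pre_solve scores) := by unfold Pre_solve; infer_instance
def pvWitness_solve : List Int := [3, 1, 4, 1, 5]

def Spec_solve (scores : List Int) (out : Int × List Int) : Prop := out = solve_alt scores
instance (scores : List Int) (out : Int × List Int) : Decidable (Spec_solve scores out) := by unfold Spec_solve; infer_instance

-- ===== CLAIM (what is proved, stated in full; the proofs are below) =====
def Claim_equal_solve : Prop := ∀ (scores : List Int), Dom_solve scores → Pre_solve scores → Spec_solve scores (solve scores)

-- ===== LEMMAS AND PROOFS =====
def pvR (a b : Int × Int) : Prop := b.1 < a.1 ∨ (a.1 = b.1 ∧ a.2 < b.2)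
theorem pvR_asymm {a b : Int × Int} (h1 : pvR a b) (h2 : pvR b a) : False := by
  unfold pvR at h1 h2; omega
theorem pv_insert_pairwise (x : Int × Int) (acc : List (Int × Int))
    (hp : acc.Pairwise pvR) (hidx : ∀ a ∈ acc, a.2 < x.2) :
    (PySem.List.insertBy (fun a b => decide (-a.1 < -b.1)) x acc).Pairwise pvR := by
  induction acc with
  | nil => simp [PySem.List.insertBy]
  | cons y ys ih =>
    rw [List.pairwise_cons] at hp
    obtain ⟨hy, hys⟩ := hp
    by_cases hlt : -x.1 < -y.1
    · simp only [PySem.List.insertBy, hlt, decide_true, if_pos]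
      refine List.Pairwise.cons ?_ (List.Pairwise.cons hy hys)
      intro z hz
      rcases List.mem_cons.mp hz with rfl | hz
      · left; omega
      · have := hy z hz
        unfold pvR at this ⊢; omega
    · simp only [PySem.List.insertBy, decide_eq_true_eq, hlt, if_neg, not_false_iff]
      refine List.Pairwise.cons ?_ (ih hys (fun a ha => hidx a (List.mem_cons_of_mem _ ha)))
      intro z hz
      rw [PySem.List.mem_insertBy] at hz
      rcases hz with rfl | hz
      · have h2 := hidx y (List.mem_cons_self ..)
        unfold pvR; omega
      · exact hy z hz

theorem pv_foldl_pairwise (l acc : List (Int × Int))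
    (hl : l.Pairwise (fun a b => a.2 < b.2)) (hacc : acc.Pairwise pvR)
    (hx : ∀ a ∈ acc, ∀ b ∈ l, a.2 < b.2) :
    (l.foldl (fun acc x => PySem.List.insertBy (fun a b => decide (-a.1 < -b.1)) x acc) acc).Pairwise pvR := by
  induction l generalizing acc with
  | nil => simpa using hacc
  | cons y ys ih =>
    rw [List.pairwise_cons] at hl
    have ih := fun acc h1 h2 => ih acc hl.2 h1 h2
    simp only [List.foldl_cons]
    refine ih _ (pv_insert_pairwise y acc hacc (fun a ha => hx a ha y (List.mem_cons_self ..))) ?_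
    intro a ha b hb
    rw [PySem.List.mem_insertBy] at ha
    rcases ha with rfl | ha
    · exact hl.1 b hb
    · exact hx a ha b (List.mem_cons_of_mem _ hb)

theorem pv_sorted_pairwise (l : List (Int × Int))
    (h : l.Pairwise (fun a b => a.2 < b.2)) :
    (PySem.List.sorted l (fun x => -x.1) false).Pairwise pvR := by
  rw [PySem.List.sorted_eq_foldl_insertBy]
  exact pv_foldl_pairwise l [] h (by simp) (by simp)

theorem pv_selBest (cs : List (Int × Int)) (b : Int × Int)
    (h : cs.Pairwise (fun a b => a.2 < b.2)) (hb : ∀ c ∈ cs, b.2 < c.2) :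
    (pvSelBest b cs ∈ b :: cs) ∧ (pvSelBest b cs = b ∨ b.1 < (pvSelBest b cs).1) ∧
      (∀ y ∈ b :: cs, y ≠ pvSelBest b cs → pvR (pvSelBest b cs) y) := by
  induction cs generalizing b with
  | nil =>
    refine ⟨List.mem_cons_self .., Or.inl rfl, ?_⟩
    intro y hy hne
    simp only [List.mem_cons, List.not_mem_nil, or_false] at hy
    exact absurd hy hne
  | cons c cs ih =>
    rw [List.pairwise_cons] at h
    by_cases hlt : b.1 < c.1
    · have step : pvSelBest b (c :: cs) = pvSelBest c cs := by
        simp [pvSelBest, List.foldl_cons, hlt]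
      obtain ⟨m1, m2, m3⟩ := ih c h.2 h.1
      rw [step]
      refine ⟨?_, ?_, ?_⟩
      · rcases List.mem_cons.mp m1 with h' | h'
        · rw [h']; simp
        · simp [h']
      · right; rcases m2 with h' | h'
        · rw [h']; exact hlt
        · omega
      · intro y hy hne
        rcases List.mem_cons.mp hy with rfl | hy
        · -- y = b: score strictly less
          left
          rcases m2 with h' | h'
          · rw [h']; exact hlt
          · omega
        · exact m3 y hy hne
    · have step : pvSelBest b (c :: cs) = pvSelBest b cs := by
        simp [pvSelBest, List.foldl_cons, hlt]
      obtain ⟨m1, m2, m3⟩ := ih b h.2 (fun x hx => hb x (List.mem_cons_of_mem _ hx))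
      rw [step]
      refine ⟨?_, m2, ?_⟩
      · rcases List.mem_cons.mp m1 with h' | h'
        · rw [h']; simp
        · simp [h']
      · intro y hy hne
        rcases List.mem_cons.mp hy with rfl | hy
        · exact m3 y (List.mem_cons_self ..) hne
        · rcases List.mem_cons.mp hy with rfl | hy
          · -- y = c: c.1 ≤ b.1 ≤ best.1; on ties best = b and b.2 < c.2
            rcases m2 with h' | h'
            · by_cases hc : y.1 < b.1
              · left; rw [h']; omega
              · right
                have hcb : y.1 = b.1 := by omega
                rw [h']
                exact ⟨hcb.symm, hb y (List.mem_cons_self ..)⟩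
            · left; clear hne; omega
          · exact m3 y (List.mem_cons_of_mem _ hy) hne

theorem pv_step (x : Int × Int) (rem' : List (Int × Int))
    (h : (x :: rem').Pairwise (fun a b => a.2 < b.2)) :
    PySem.List.sorted (x :: rem') (fun x => -x.1) false =
      pvSelBest x rem' :: PySem.List.sorted ((x :: rem').erase (pvSelBest x rem')) (fun x => -x.1) false := by
  have hcons := List.pairwise_cons.mp h
  obtain ⟨m1, _, m3⟩ := pv_selBest rem' x hcons.2 hcons.1
  have hnd : (x :: rem').Nodup := h.imp (fun {a b} hab => by
    intro e; rw [e] at hab; exact absurd hab (lt_irrefl _))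
  have hperm : (PySem.List.sorted (x :: rem') (fun x => -x.1) false).Perm
      (pvSelBest x rem' :: PySem.List.sorted ((x :: rem').erase (pvSelBest x rem')) (fun x => -x.1) false) := by
    refine (PySem.List.sorted_perm _ _ _).trans ?_
    refine (List.perm_cons_erase m1).trans ?_
    exact List.Perm.cons _ (PySem.List.sorted_perm _ _ _).symm
  refine List.Perm.eq_of_pairwise (le := pvR) ?_ ?_ ?_ hperm
  · intro a b _ _ hab hba
    exact absurd hba (fun hh => pvR_asymm hab hh)
  · exact pv_sorted_pairwise _ h
  · refine List.Pairwise.cons ?_ (pv_sorted_pairwise _ (h.sublist (List.erase_sublist ..)))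
    intro z hz
    rw [PySem.List.mem_sorted] at hz
    have hz' := List.Nodup.mem_erase_iff hnd |>.mp hz
    exact m3 z hz'.2 hz'.1


theorem pv_remove_getD (rem : List (Int × Int)) (v : Int × Int) (hv : v ∈ rem) :
    (PySem.List.remove? rem v).getD rem = rem.erase v := by
  simp only [PySem.List.remove?]
  induction rem with
  | nil => simp at hv
  | cons x xs ih =>
    by_cases hx : x = v
    · subst hx; simp [List.idxOf?_cons]
    · have hv' : v ∈ xs := by
        rcases List.mem_cons.mp hv with rfl | h
        · exact absurd rfl hx
        · exact h
      rcases h' : List.idxOf? v xs with _ | k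
      · rw [List.idxOf?_eq_none_iff] at h'; exact absurd hv' h'
      · have hbeq : (x == v) = false := by simp [hx]
        simp only [List.idxOf?_cons, hbeq, Bool.false_eq_true, if_false, h', Option.map_some,
          Option.getD_some, List.erase_cons, List.eraseIdx_cons_succ]
        have := ih hv'
        rw [h'] at this
        simp only [Option.map_some, Option.getD_some] at this
        rw [this]

theorem pv_pick (k : Nat) (rem : List (Int × Int)) (tot : Int) (nums : List Int)
    (hk : k ≤ rem.length) (hp : rem.Pairwise (fun a b => a.2 < b.2)) :
    pvPick k rem tot nums =
      (tot + (((PySem.List.sorted rem (fun x => -x.1) false).take k).map Prod.fst).sum,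
       nums ++ ((PySem.List.sorted rem (fun x => -x.1) false).take k).map Prod.snd) := by
  induction k generalizing rem tot nums with
  | zero => simp [pvPick]
  | succ k ih =>
    rcases rem with _ | ⟨x, rem'⟩
    · simp at hk
    · have hcons := List.pairwise_cons.mp hp
      obtain ⟨m1, _, _⟩ := pv_selBest rem' x hcons.2 hcons.1
      have hstep := pv_step x rem' hp
      simp only [pvPick, PySem.List.pyGetD_zero_cons, PySem.List.slice_from_one, List.tail_cons]
      rw [pv_remove_getD _ _ m1]
      set best := pvSelBest x rem' with hbest
      have hlen : ((x :: rem').erase best).length = rem'.length := by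
        rw [List.length_erase_of_mem m1]; simp
      rw [ih _ _ _ (by simp at hk; omega) (hp.sublist (List.erase_sublist ..))]
      rw [hstep]
      simp only [List.take_succ_cons, List.map_cons, List.sum_cons]
      simp only [Prod.mk.injEq, List.append_assoc, List.cons_append, List.nil_append, and_true]
      ring

theorem pv_aloop (sl : List (Int × Int)) (h : 5 ≤ sl.length) :
    (PySem.List.pyRange 0 5 1).foldl
      (fun (st : Int × List Int) i =>
        let p := PySem.List.pyGetD sl i (0, 0)
        (st.1 + p.1, st.2 ++ [p.2])) (0, []) =
      (((sl.take 5).map Prod.fst).sum, (sl.take 5).map Prod.snd) := by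
  rcases sl with _ | ⟨a, sl⟩; · simp at h
  rcases sl with _ | ⟨b, sl⟩; · simp at h
  rcases sl with _ | ⟨c, sl⟩; · simp at h
  rcases sl with _ | ⟨d, sl⟩; · simp at h
  rcases sl with _ | ⟨e, sl⟩; · simp at h
  rw [show PySem.List.pyRange 0 5 1 = [0, 1, 2, 3, 4] from by decide]
  rw [show (1:Int) = ((1:Nat):Int) by norm_num, show (2:Int) = ((2:Nat):Int) by norm_num,
      show (3:Int) = ((3:Nat):Int) by norm_num, show (4:Int) = ((4:Nat):Int) by norm_num]
  simp only [List.foldl_cons, List.foldl_nil, PySem.List.pyGetD, PySem.List.pyGet?_natCast]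
  simp
  ring

-- ===== VERDICT (by name: the statement is the Claim_ definition above) =====
theorem solve_spec : Claim_equal_solve := by
  intro scores _ hpre
  unfold Spec_solve solve solve_alt
  have hpw : ((PySem.List.enumerate scores 1).map (fun p => (p.2, p.1))).Pairwise
      (fun a b : Int × Int => a.2 < b.2) := by
    rw [List.pairwise_map]
    exact PySem.List.pairwise_lt_enumerate scores 1
  have hlen : ((PySem.List.enumerate scores 1).map (fun p => (p.2, p.1))).length = scores.length := by
    rw [List.length_map, PySem.List.length_enumerate]
  have h5 : 5 ≤ ((PySem.List.enumerate scores 1).map (fun p => (p.2, p.1))).length := by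
    rw [hlen]; exact hpre
  have hslen : 5 ≤ (PySem.List.sorted ((PySem.List.enumerate scores 1).map (fun p => (p.2, p.1)))
      (fun x => -x.1) false).length := by
    rw [PySem.List.length_sorted]; exact h5
  simp only [pv_pick 5 _ 0 [] h5 hpw, pv_aloop _ hslen, zero_add, List.nil_append]
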